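-- pv_equiv track=rewrite | github.com/qibinhang/dream_loc | src/Features/fixing_history.py | collect_code_commit_timestamp
-- ===== SOURCE A (Python) =====
-- def collect_code_commit_timestamp(reports):
--     code_commit_timestamp = {}
--     for r in reports:
--         for path in r[1]:
--             each_code_commit_timestamps = code_commit_timestamp.get(path, [])
--             each_code_commit_timestamps.append(r[3])
--             code_commit_timestamp[path] = each_code_commit_timestamps
--     for path, each_code_commit_timestamps in code_commit_timestamp.items():
--         sorted_ecct = list(sorted(each_code_commit_timestamps))
--         code_commit_timestamp[path] = sorted_ecct
--     return code_commit_timestamp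
-- ===== SOURCE B (Python) =====
-- def collect_code_commit_timestamp(reports):
--     pairs = [(path, r[3]) for r in reports for path in r[1]]
--     result = {path: [] for path, _ in pairs}
--     for path, ts in sorted(pairs, key=lambda p: p[1]):
--         result[path].append(ts)
--     return result
-- ===== Notes on version B (the rewrite author's own statement) =====
-- stated objective: alternative
-- what changed: Instead of grouping timestamps per path and then sorting each group's list, B flattens reports into (path, timestamp) pairs, stably sorts that single flat list by timestamp once, and distributes the timestamps into pre-seeded per-path lists in one grouping pass.
import Mathlib
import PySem

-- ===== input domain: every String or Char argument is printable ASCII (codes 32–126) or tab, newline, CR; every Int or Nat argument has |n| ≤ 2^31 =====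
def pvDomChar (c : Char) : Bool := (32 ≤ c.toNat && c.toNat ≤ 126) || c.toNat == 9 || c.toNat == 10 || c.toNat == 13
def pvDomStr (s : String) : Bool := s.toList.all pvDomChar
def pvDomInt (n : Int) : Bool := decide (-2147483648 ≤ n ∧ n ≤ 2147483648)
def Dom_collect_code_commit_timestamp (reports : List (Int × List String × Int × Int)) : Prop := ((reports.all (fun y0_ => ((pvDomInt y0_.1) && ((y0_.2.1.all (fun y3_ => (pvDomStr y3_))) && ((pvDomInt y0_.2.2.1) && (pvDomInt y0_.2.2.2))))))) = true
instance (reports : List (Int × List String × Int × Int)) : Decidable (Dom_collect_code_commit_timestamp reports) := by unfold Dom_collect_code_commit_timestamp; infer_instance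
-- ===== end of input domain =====

-- B replaces A's per-path collect-then-sort by one global stable sort of the flat
-- (path, timestamp) pairs followed by a single grouping pass (objective: alternative).

-- ===== PORT A =====
-- literal port of A: build dict path -> appended timestamps, then re-insert each value sorted
def collect_code_commit_timestamp (reports : List (Int × List String × Int × Int)) : List (String × List Int) :=
  let d := reports.foldl (fun d r =>
      r.2.1.foldl (fun d path =>
        let each_code_commit_timestamps := d.getD path []
        let each_code_commit_timestamps := each_code_commit_timestamps ++ [r.2.2.2]
        d.insert path each_code_commit_timestamps) d)
    PySem.Dict.empty
  (d.items.foldl (fun d2 pr =>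
      d2.insert pr.1 (PySem.List.sorted pr.2 (fun x => x) false)) d).items

-- ===== PORT B =====
-- literal port of B: flat pairs, seed dict with [], stable global sort by timestamp, group
def collect_code_commit_timestamp_alt (reports : List (Int × List String × Int × Int)) : List (String × List Int) :=
  let pairs := reports.flatMap (fun r => r.2.1.map (fun path => (path, r.2.2.2)))
  let result := pairs.foldl (fun d pr => d.insert pr.1 ([] : List Int)) PySem.Dict.empty
  ((PySem.List.sorted pairs (fun p => p.2) false).foldl
      (fun d pr => d.modify pr.1 [] (· ++ [pr.2])) result).items

-- ===== PRECONDITION & SPEC =====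
def Spec_collect_code_commit_timestamp (reports : List (Int × List String × Int × Int)) (out : List (String × List Int)) : Prop := out = collect_code_commit_timestamp_alt reports
instance (reports : List (Int × List String × Int × Int)) (out : List (String × List Int)) : Decidable (Spec_collect_code_commit_timestamp reports out) := by unfold Spec_collect_code_commit_timestamp; infer_instance

-- ===== CLAIM (what is proved, stated in full; the proofs are below) =====
def Claim_equal_collect_code_commit_timestamp : Prop := ∀ (reports : List (Int × List String × Int × Int)), Dom_collect_code_commit_timestamp reports → Spec_collect_code_commit_timestamp reports (collect_code_commit_timestamp reports)

-- ===== LEMMAS AND PROOFS =====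

-- the flat (path, timestamp) list both programs are about
def pvPairs (reports : List (Int × List String × Int × Int)) : List (String × Int) :=
  reports.flatMap (fun r => r.2.1.map (fun path => (path, r.2.2.2)))

-- the common key list (paths in first-appearance order)
def pvKeys (reports : List (Int × List String × Int × Int)) : List String :=
  PySem.Set.ofList ((pvPairs reports).map Prod.fst)

-- A's first loop is the modify-append fold over the flat pair list
theorem pvA_phase1 (reports : List (Int × List String × Int × Int)) :
    reports.foldl (fun d r =>
      r.2.1.foldl (fun d path => d.insert path (d.getD path [] ++ [r.2.2.2])) d)
      (PySem.Dict.empty : PySem.Dict String (List Int))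
    = (pvPairs reports).foldl (fun d pr => d.modify pr.1 [] (· ++ [pr.2])) PySem.Dict.empty := by
  unfold pvPairs
  rw [List.foldl_flatMap]
  simp only [List.foldl_map]
  rfl

-- updating a set with elements it already has changes nothing
theorem pvSet_update_of_subset {α : Type} [BEq α] [LawfulBEq α]
    (s : PySem.Set α) (l : List α) (h : ∀ x ∈ l, x ∈ s) : PySem.Set.update s l = s := by
  rw [PySem.Set.update_eq_append_filter]
  have hnil : (PySem.Set.ofList l).filter (fun y => !(PySem.Set.contains s y)) = [] := by
    apply List.filter_eq_nil_iff.mpr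
    intro a ha
    simp only [pysem] at ha
    simp [h a ha]
  rw [hnil, List.append_nil]

-- seed fold: every value is []
theorem pvSeed_getD (l : List (String × Int)) (d : PySem.Dict String (List Int))
    (h : ∀ k, d.getD k [] = []) (k : String) :
    (l.foldl (fun d pr => d.insert pr.1 ([] : List Int)) d).getD k [] = [] := by
  induction l generalizing d with
  | nil => exact h k
  | cons p t ih =>
      refine ih _ (fun k' => ?_)
      rw [PySem.Dict.getD_insert]
      split_ifs <;> simp [h]

-- overwrite loop, lookup of an untouched key
theorem pvOverwrite_getD_not_mem (g : List Int → List Int)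
    (l : List (String × List Int)) (d : PySem.Dict String (List Int)) (k : String)
    (hk : k ∉ l.map Prod.fst) :
    (l.foldl (fun a p => a.insert p.1 (g p.2)) d).getD k [] = d.getD k [] := by
  induction l generalizing d with
  | nil => rfl
  | cons p t ih =>
      simp only [List.map_cons, List.mem_cons, not_or] at hk
      rw [List.foldl_cons, ih _ hk.2, PySem.Dict.getD_insert, if_neg hk.1]

-- overwrite loop over distinct keys, lookup of a listed key
theorem pvOverwrite_getD_mem (g : List Int → List Int)
    (l : List (String × List Int)) (d : PySem.Dict String (List Int)) (k : String) (v : List Int)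
    (hnd : (l.map Prod.fst).Nodup) (hmem : (k, v) ∈ l) :
    (l.foldl (fun a p => a.insert p.1 (g p.2)) d).getD k [] = g v := by
  induction l generalizing d with
  | nil => cases hmem
  | cons p t ih =>
      simp only [List.map_cons, List.nodup_cons] at hnd
      rcases List.mem_cons.mp hmem with h1 | h1
      · subst h1
        rw [List.foldl_cons, pvOverwrite_getD_not_mem g t _ k hnd.1,
          PySem.Dict.getD_insert_self]
      · rw [List.foldl_cons]
        exact ih _ hnd.2 h1

-- per-key value equality: filtering the globally sorted pairs gives the sorted group
theorem pvGroup_sorted (pairs : List (String × Int)) (k : String) :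
    PySem.List.sorted ((pairs.filter (fun p => p.1 == k)).map (·.2)) (fun x => x) false
    = ((PySem.List.sorted pairs (fun p => p.2) false).filter (fun p => p.1 == k)).map (·.2) := by
  apply PySem.List.sorted_id_eq_of_perm_of_pairwise
  · exact ((PySem.List.sorted_perm pairs (fun p => p.2) false).filter _).map _
  · exact List.pairwise_map.mpr
      ((PySem.List.sorted_pairwise pairs (fun p => p.2)).sublist List.filter_sublist)

-- characterization of A's result
theorem pvA_char (reports : List (Int × List String × Int × Int)) :
    collect_code_commit_timestamp reports =
      (pvKeys reports).map (fun k => (k,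
        PySem.List.sorted (((pvPairs reports).filter (fun p => p.1 == k)).map (·.2)) (fun x => x) false)) := by
  unfold collect_code_commit_timestamp
  rw [pvA_phase1]
  set d := (pvPairs reports).foldl (fun d pr => d.modify pr.1 [] (· ++ [pr.2]))
    (PySem.Dict.empty : PySem.Dict String (List Int)) with hd
  have hkeyseq : d.keys = d.items.map Prod.fst := rfl
  have hnd : d.keys.Nodup := by
    rw [hd]
    exact PySem.Dict.nodup_keys_foldl_modify_key _ _ _ _ _ PySem.Dict.nodup_keys_empty
  have hkeys : d.keys = pvKeys reports := by
    rw [hd, PySem.Dict.keys_foldl_modify_key, PySem.Dict.keys_empty,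
      PySem.Set.update_nil_left]
    rfl
  have hget : ∀ k, d.getD k [] = ((pvPairs reports).filter (fun p => p.1 == k)).map (·.2) := by
    intro k
    rw [hd, PySem.Dict.getD_foldl_modify_append, PySem.Dict.getD_empty, List.nil_append]
  have hitems : d.items = d.keys.map (fun k => (k, d.getD k [])) :=
    PySem.Dict.items_eq_map_keys d hnd []
  set d2 := d.items.foldl (fun d2 pr =>
      d2.insert pr.1 (PySem.List.sorted pr.2 (fun x => x) false)) d with hd2
  have hnd2 : d2.keys.Nodup := by
    rw [hd2]
    exact PySem.Dict.nodup_keys_foldl_insert_key _ _ _ _ hnd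
  have hkeys2 : d2.keys = d.keys := by
    rw [hd2, PySem.Dict.keys_foldl_insert_key]
    exact pvSet_update_of_subset _ _ (fun x hx => by rwa [← hkeyseq] at hx)
  have hget2 : ∀ k ∈ d.keys, d2.getD k [] =
      PySem.List.sorted (d.getD k []) (fun x => x) false := by
    intro k hk
    rw [hd2]
    exact pvOverwrite_getD_mem (fun v => PySem.List.sorted v (fun x => x) false)
      d.items d k (d.getD k []) (hkeyseq ▸ hnd)
      (hitems ▸ List.mem_map.mpr ⟨k, hk, rfl⟩)
  rw [PySem.Dict.items_eq_map_keys d2 hnd2 [], hkeys2, ← hkeys]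
  exact List.map_congr_left (fun k hk => by rw [hget2 k hk, hget k])

-- characterization of B's result
theorem pvB_char (reports : List (Int × List String × Int × Int)) :
    collect_code_commit_timestamp_alt reports =
      (pvKeys reports).map (fun k => (k,
        ((PySem.List.sorted (pvPairs reports) (fun p => p.2) false).filter (fun p => p.1 == k)).map (·.2))) := by
  unfold collect_code_commit_timestamp_alt
  have hpairs : reports.flatMap (fun r => r.2.1.map (fun path => (path, r.2.2.2))) = pvPairs reports := rfl
  rw [hpairs]
  set rB := (pvPairs reports).foldl (fun d pr => d.insert pr.1 ([] : List Int))
    PySem.Dict.empty with hrB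
  have hndB : rB.keys.Nodup := by
    rw [hrB]
    exact PySem.Dict.nodup_keys_foldl_insert_key _ _ _ _ PySem.Dict.nodup_keys_empty
  have hkB : rB.keys = pvKeys reports := by
    rw [hrB, PySem.Dict.keys_foldl_insert_key, PySem.Dict.keys_empty,
      PySem.Set.update_nil_left]
    rfl
  have hgB : ∀ k, rB.getD k [] = [] := by
    intro k
    rw [hrB]
    exact pvSeed_getD _ _ (fun k' => PySem.Dict.getD_empty _ _) k
  set sp := PySem.List.sorted (pvPairs reports) (fun p => p.2) false with hsp
  set dB := sp.foldl (fun d pr => d.modify pr.1 [] (· ++ [pr.2])) rB with hdB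
  have hndB2 : dB.keys.Nodup := by
    rw [hdB]
    exact PySem.Dict.nodup_keys_foldl_modify_key _ _ _ _ _ hndB
  have hkeysB2 : dB.keys = rB.keys := by
    rw [hdB, PySem.Dict.keys_foldl_modify_key]
    apply pvSet_update_of_subset
    intro x hx
    rcases List.mem_map.mp hx with ⟨p, hp, rfl⟩
    rw [hkB]
    have hpp : p ∈ pvPairs reports := (PySem.List.mem_sorted _ _ _ _).mp hp
    unfold pvKeys
    simp only [pysem]
    exact List.mem_map.mpr ⟨p, hpp, rfl⟩
  have hgetB : ∀ k, dB.getD k [] = (sp.filter (fun p => p.1 == k)).map (·.2) := by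
    intro k
    rw [hdB, PySem.Dict.getD_foldl_modify_append, hgB, List.nil_append]
  rw [PySem.Dict.items_eq_map_keys dB hndB2 [], hkeysB2, hkB]
  exact List.map_congr_left (fun k hk => by rw [hgetB k])

-- ===== VERDICT (by name: the statement is the Claim_ definition above) =====
theorem collect_code_commit_timestamp_spec : Claim_equal_collect_code_commit_timestamp := by
  intro reports _
  unfold Spec_collect_code_commit_timestamp
  rw [pvA_char, pvB_char]
  exact List.map_congr_left (fun k _ => by rw [pvGroup_sorted])
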